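-- pv_equiv track=rewrite | github.com/rrrrrrri/fgt-gadgets | gen_license/patcher.py | gen_regex_from_sig
-- ===== SOURCE A (Python) =====
-- def gen_regex_from_sig(sig):
--     regex = ""
--     _split_sig = sig.split()
--     i = 0
--     while True:
--         if i >= len(_split_sig):
--             break
--         if _split_sig[i] != "??":
--             regex += "\\x"
--             regex += _split_sig[i]
--             i += 1
--         elif _split_sig[i] == "??":
--             _dyn_byte_count = 1
--             while True:
--                 i += 1
--                 if i >= len(_split_sig):
--                     break
--                 if _split_sig[i] == "??":
--                     _dyn_byte_count += 1
--                 else: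
--                     break
--             regex += ".{%d}" % _dyn_byte_count
--     return regex
-- ===== SOURCE B (Python) =====
-- def gen_regex_from_sig(sig):
--     toks = sig.split()
--     lits = [(i, t) for i, t in enumerate(toks) if t != "??"]
--     out = []
--     prev = -1
--     for j, t in lits:
--         if j - prev > 1:
--             out.append(".{%d}" % (j - prev - 1))
--         out.append("\\x" + t)
--         prev = j
--     if len(toks) - prev > 1:
--         out.append(".{%d}" % (len(toks) - prev - 1))
--     return "".join(out)
-- ===== Notes on version B (the rewrite author's own statement) =====
-- stated objective: alternative
-- what changed: Instead of A's single pass with a nested loop that counts each wildcard run, B first collects the positions of the literal tokens and then derives every wildcard-run length by gap arithmetic on consecutive literal positions (plus one trailing flush), with no run-counting loop at all.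
import Mathlib
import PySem

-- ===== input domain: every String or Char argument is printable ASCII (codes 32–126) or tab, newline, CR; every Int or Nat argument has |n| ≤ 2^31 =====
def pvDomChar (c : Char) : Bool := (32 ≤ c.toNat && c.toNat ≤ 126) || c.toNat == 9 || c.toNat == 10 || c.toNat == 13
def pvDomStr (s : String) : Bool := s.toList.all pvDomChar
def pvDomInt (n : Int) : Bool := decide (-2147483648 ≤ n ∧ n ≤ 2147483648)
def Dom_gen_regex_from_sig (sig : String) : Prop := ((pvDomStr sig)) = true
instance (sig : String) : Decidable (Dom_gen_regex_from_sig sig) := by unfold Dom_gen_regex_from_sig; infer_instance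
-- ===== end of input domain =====

-- B replaces A's single pass with a nested wildcard-counting loop by gap arithmetic: it first
-- collects the positions of the literal tokens, then derives each wildcard-run length
-- as the difference between consecutive literal positions (alternative decomposition, same cost).

-- ===== PORT A =====
-- A's inner 'while True' that counts the run of "??" tokens: starts at count 1, consumes
-- following "??" tokens, stops at the first non-"??" token or the end.
def pvCountWild : List String → Nat → Nat × List String
  | [], n => (n, [])
  | t :: rest, n => if t = "??" then pvCountWild rest (n + 1) else (n, t :: rest)

theorem pvCountWild_len (l : List String) (n : Nat) : (pvCountWild l n).2.length ≤ l.length := by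
  induction l generalizing n with
  | nil => simp [pvCountWild]
  | cons t rest ih =>
    simp only [pvCountWild]
    split
    · exact le_trans (ih _) (Nat.le_succ _)
    · simp

-- A's outer 'while True' over the split tokens, carrying the regex accumulator.
def pvLoopA : List String → List Char → List Char
  | [], regex => regex
  | t :: rest, regex =>
    if t ≠ "??" then pvLoopA rest (regex ++ ['\\', 'x'] ++ t.toList)
    else
      let p := pvCountWild rest 1
      pvLoopA p.2 (regex ++ ['.', '{'] ++ PySem.Int.toChars (p.1 : Int) ++ ['}'])
  termination_by l _ => l.length
  decreasing_by
  · simp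
  · exact Nat.lt_succ_of_le (pvCountWild_len rest 1)

def gen_regex_from_sig (sig : String) : String :=
  String.ofList (pvLoopA (PySem.Str.split₀ sig) [])

-- ===== PORT B =====
-- ".{%d}" % n
def pvWild (n : Int) : List Char := '.' :: '{' :: (PySem.Int.toChars n ++ ['}'])

-- the list comprehension: positions (and tokens) of the literal entries
def pvLits (toks : List String) : List (Int × String) :=
  (PySem.List.enumerate toks).filter (fun p => p.2 != "??")

-- the body of B's for-loop, state = (out, prev)
def pvStepB (st : List Char × Int) (p : Int × String) : List Char × Int :=
  (st.1 ++ (if p.1 - st.2 > 1 then pvWild (p.1 - st.2 - 1) else []) ++ '\\' :: 'x' :: p.2.toList,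
   p.1)

def gen_regex_from_sig_alt (sig : String) : String :=
  let toks := PySem.Str.split₀ sig
  let r := (pvLits toks).foldl pvStepB ([], -1)
  String.ofList
    (if (toks.length : Int) - r.2 > 1 then r.1 ++ pvWild ((toks.length : Int) - r.2 - 1) else r.1)

-- ===== PRECONDITION & SPEC =====
def Spec_gen_regex_from_sig (sig : String) (out : String) : Prop := out = gen_regex_from_sig_alt sig
instance (sig : String) (out : String) : Decidable (Spec_gen_regex_from_sig sig out) := by unfold Spec_gen_regex_from_sig; infer_instance

-- ===== CLAIM (what is proved, stated in full; the proofs are below) =====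
def Claim_equal_gen_regex_from_sig : Prop := ∀ (sig : String), Dom_gen_regex_from_sig sig → Spec_gen_regex_from_sig sig (gen_regex_from_sig sig)

-- ===== LEMMAS AND PROOFS =====

-- recursive reading of B's fold: the rendered pieces and the final prev
def pvCore : Int → List (Int × String) → List Char
  | _, [] => []
  | p, (j, u) :: l => (if j - p > 1 then pvWild (j - p - 1) else []) ++ '\\' :: 'x' :: u.toList ++ pvCore j l

def pvLast : Int → List (Int × String) → Int
  | p, [] => p
  | _, (j, _) :: l => pvLast j l

theorem pvFoldB_eq (l : List (Int × String)) (out : List Char) (p : Int) :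
    l.foldl pvStepB (out, p) = (out ++ pvCore p l, pvLast p l) := by
  induction l generalizing out p with
  | nil => simp [pvCore, pvLast]
  | cons q l ih =>
    obtain ⟨j, u⟩ := q
    simp [List.foldl_cons, pvStepB, ih, pvCore, pvLast]

def pvShift (k : Int) (l : List (Int × String)) : List (Int × String) :=
  l.map (fun q => (q.1 + k, q.2))

theorem pvCore_shift (l : List (Int × String)) (k p : Int) :
    pvCore p (pvShift k l) = pvCore (p - k) l := by
  induction l generalizing p with
  | nil => simp [pvShift, pvCore]
  | cons q l ih =>
    obtain ⟨j, u⟩ := q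
    have h1 : j + k - p = j - (p - k) := by ring
    have h2 : j + k - p - 1 = j - (p - k) - 1 := by ring
    simp only [pvShift, List.map_cons, pvCore, h1]
    have := ih (j + k)
    simp only [pvShift] at this
    rw [this]
    have h3 : j + k - k = j := by ring
    rw [h3]

theorem pvLast_shift (l : List (Int × String)) (k p : Int) :
    pvLast p (pvShift k l) = pvLast (p - k) l + k := by
  induction l generalizing p with
  | nil => simp [pvShift, pvLast]
  | cons q l ih =>
    obtain ⟨j, u⟩ := q
    simp only [pvShift, List.map_cons, pvLast]
    have := ih (j + k)
    simp only [pvShift] at this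
    rw [this]
    have h3 : j + k - k = j := by ring
    rw [h3]

-- enumerate from a shifted start = shift of enumerate
theorem pvEnumerate_shift (toks : List String) (s k : Int) :
    PySem.List.enumerate toks (s + k) = pvShift k (PySem.List.enumerate toks s) := by
  induction toks generalizing s with
  | nil => simp [PySem.List.enumerate_nil, pvShift]
  | cons t rest ih =>
    simp only [PySem.List.enumerate_cons, pvShift, List.map_cons]
    congr 1
    have : s + k + 1 = (s + 1) + k := by ring
    rw [this, ih]
    rfl

theorem pvLits_shift (toks : List String) (k : Int) :
    (PySem.List.enumerate toks k).filter (fun p => p.2 != "??")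
      = pvShift k (pvLits toks) := by
  unfold pvLits pvShift
  have h : PySem.List.enumerate toks k = (PySem.List.enumerate toks 0).map (fun q => (q.1 + k, q.2)) := by
    have h0 := pvEnumerate_shift toks 0 k
    rw [show (0 : Int) + k = k by ring] at h0
    simpa [pvShift] using h0
  rw [h, List.filter_map]
  congr 1

-- structure of the literal-position list
theorem pvLits_nil : pvLits [] = [] := by simp [pvLits, PySem.List.enumerate_nil]

theorem pvLits_cons_lit (t : String) (rest : List String) (h : t ≠ "??") :
    pvLits (t :: rest) = (0, t) :: pvShift 1 (pvLits rest) := by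
  unfold pvLits
  rw [PySem.List.enumerate_cons]
  rw [List.filter_cons]
  simp only [h, bne_iff_ne, ne_eq, not_false_eq_true, if_pos]
  congr 1
  have : (0 : Int) + 1 = 1 := by ring
  rw [this] at *
  exact pvLits_shift rest 1

theorem pvLits_replicate_append (k : Nat) (l : List String) :
    pvLits (List.replicate k "??" ++ l) = pvShift k (pvLits l) := by
  unfold pvLits
  rw [PySem.List.enumerate_append, List.filter_append]
  have h1 : (List.filter (fun p => p.2 != "??") (PySem.List.enumerate (List.replicate k "??") 0)) = [] := by
    rw [List.filter_eq_nil_iff]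
    intro p hp
    rw [PySem.List.mem_enumerate_iff] at hp
    obtain ⟨i, hi, rfl⟩ := hp
    simp [List.getElem_replicate]
  rw [h1, List.nil_append]
  simp only [List.length_replicate]
  rw [show (0 : Int) + (k : Int) = (k : Int) by ring]
  exact pvLits_shift l k

-- A's run counter is takeWhile/dropWhile
theorem pvCountWild_eq (l : List String) (n : Nat) :
    pvCountWild l n = (n + (l.takeWhile (fun t => t == "??")).length, l.dropWhile (fun t => t == "??")) := by
  induction l generalizing n with
  | nil => simp [pvCountWild, List.takeWhile, List.dropWhile]
  | cons t rest ih =>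
    by_cases h : t = "??"
    · simp [pvCountWild, h, ih]
      omega
    · simp [pvCountWild, h]

theorem pvTakeWhile_wild_eq_replicate (l : List String) :
    l.takeWhile (fun t => t == "??") = List.replicate (l.takeWhile (fun t => t == "??")).length "??" := by
  apply List.eq_replicate_of_mem
  intro b hb
  have := List.mem_takeWhile_imp hb
  simpa using this

theorem pvDropWhile_head_not_wild (l : List String) (u : String) (m : List String)
    (h : l.dropWhile (fun t => t == "??") = u :: m) : u ≠ "??" := by
  induction l with
  | nil => exact absurd h (by simp [List.dropWhile])
  | cons a l ih =>
    by_cases ha : a = "??"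
    · rw [List.dropWhile_cons_of_pos (by simp [ha])] at h
      exact ih h
    · rw [List.dropWhile_cons_of_neg (by simp [ha])] at h
      obtain ⟨rfl, -⟩ := List.cons.injEq .. ▸ h
      exact ha

-- the trailing flush after B's loop
def pvTrail (toks : List String) : List Char :=
  if (toks.length : Int) - pvLast (-1) (pvLits toks) > 1
  then pvWild ((toks.length : Int) - pvLast (-1) (pvLits toks) - 1) else []

theorem pvLoopA_eq (toks : List String) (acc : List Char) :
    pvLoopA toks acc = acc ++ pvCore (-1) (pvLits toks) ++ pvTrail toks := by
  induction hn : toks.length using Nat.strong_induction_on generalizing toks acc with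
  | _ n ih =>
    cases toks with
    | nil => simp [pvLoopA, pvLits_nil, pvCore, pvTrail, pvLast]
    | cons t rest =>
      by_cases h : t = "??"
      · -- wildcard case: peel the whole run of 1 + tw wildcards
        subst h
        rw [pvLoopA]
        simp only [ne_eq, not_true_eq_false, if_false]
        rw [pvCountWild_eq]
        dsimp only
        obtain ⟨tw, htw⟩ : ∃ tw, (List.takeWhile (fun t => t == "??") rest).length = tw := ⟨_, rfl⟩
        obtain ⟨rest', hrest'⟩ : ∃ r, List.dropWhile (fun t => t == "??") rest = r := ⟨_, rfl⟩
        rw [htw, hrest']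
        have hdecomp : "??" :: rest = List.replicate (1 + tw) "??" ++ rest' := by
          conv_lhs => rw [← List.takeWhile_append_dropWhile (p := fun t => t == "??") (l := rest)]
          rw [hrest', pvTakeWhile_wild_eq_replicate rest, htw, Nat.add_comm, List.replicate_succ,
            List.cons_append]
        have hlen' : rest'.length < n := by
          rw [← hrest']
          subst hn
          have := List.length_dropWhile_le (p := fun t => t == "??") (l := rest)
          simp only [List.length_cons]
          omega
        rw [ih _ hlen' _ _ rfl, hdecomp, pvLits_replicate_append, pvCore_shift]
        cases rest' with
        | nil =>
          simp only [pvLits_nil, pvCore, pvTrail, pvLast, List.append_nil]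
          have h0 : ¬ (((([] : List String)).length : Int) - (-1) > 1) := by simp
          rw [if_neg h0]
          have hL : pvLits (List.replicate (1 + tw) "??") = [] := by
            have h4 := pvLits_replicate_append (1 + tw) []
            simpa [pvLits_nil, pvShift] using h4
          rw [hL]
          simp only [pvLast, List.length_replicate]
          have h1 : ((1 + tw : Nat) : Int) - (-1) > 1 := by push_cast; omega
          rw [if_pos h1]
          have h2 : ((1 + tw : Nat) : Int) - (-1) - 1 = ((1 + tw : Nat) : Int) := by ring
          rw [h2]
          simp [pvWild]
        | cons u rs =>
          have hu : u ≠ "??" := pvDropWhile_head_not_wild rest u rs hrest'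
          rw [pvLits_cons_lit u rs hu]
          have htr : pvTrail (List.replicate (1 + tw) "??" ++ u :: rs) = pvTrail (u :: rs) := by
            unfold pvTrail
            rw [pvLits_replicate_append, pvLast_shift, pvLits_cons_lit u rs hu]
            simp only [pvLast]
            have e : ((List.replicate (1 + tw) "??" ++ u :: rs).length : Int)
                - (pvLast 0 (pvShift 1 (pvLits rs)) + (1 + tw : Nat))
                = ((u :: rs).length : Int) - pvLast 0 (pvShift 1 (pvLits rs)) := by
              simp only [List.length_append, List.length_replicate]
              push_cast
              ring
            rw [e]
          rw [htr]
          simp only [pvCore]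
          have hc1 : ¬ ((0 : Int) - (-1) > 1) := by omega
          have hc2 : (0 : Int) - (-1 - ((1 + tw : Nat) : Int)) > 1 := by push_cast; omega
          rw [if_neg hc1, if_pos hc2]
          have h3 : (0 : Int) - (-1 - ((1 + tw : Nat) : Int)) - 1 = ((1 + tw : Nat) : Int) := by
            push_cast; ring
          rw [h3]
          simp [pvWild, List.append_assoc]
      · -- literal head
        rw [pvLoopA]
        simp only [ne_eq, h, not_false_eq_true, if_true]
        have hlen : rest.length < n := by subst hn; simp
        rw [ih _ hlen _ _ rfl, pvLits_cons_lit t rest h]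
        have htr : pvTrail (t :: rest) = pvTrail rest := by
          unfold pvTrail
          rw [pvLits_cons_lit t rest h]
          simp only [pvLast]
          rw [pvLast_shift]
          have e : ((t :: rest).length : Int) - (pvLast (0 - 1) (pvLits rest) + 1)
              = (rest.length : Int) - pvLast (0 - 1) (pvLits rest) := by
            simp only [List.length_cons]
            push_cast
            ring
          rw [e]
          norm_num
        rw [htr]
        simp only [pvCore]
        have hc : ¬ ((0 : Int) - (-1) > 1) := by omega
        rw [if_neg hc, pvCore_shift]
        have h01 : (0 : Int) - 1 = -1 := by norm_num
        rw [h01]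
        simp [List.append_assoc]

-- ===== VERDICT (by name: the statement is the Claim_ definition above) =====
theorem gen_regex_from_sig_spec : Claim_equal_gen_regex_from_sig := by
  intro sig _
  unfold Spec_gen_regex_from_sig gen_regex_from_sig gen_regex_from_sig_alt
  rw [pvLoopA_eq]
  dsimp only
  rw [pvFoldB_eq]
  unfold pvTrail
  split <;> simp
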